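-- pv_equiv track=rewrite | github.com/HiMemX/SkinToIcon | SkinToIcon/pnglib.py | clamp_rgb_size
-- ===== SOURCE A (Python) =====
-- def clamp_rgb_size(rgb, pixelx, pixely):
--     side_padding_len = int((pixelx-len(rgb[0]))/2)
--     top_padding_len = int((pixely-len(rgb))/2)
--     new_rgb = []
--
--     rgb = [[(0, 0, 0, 0) for i in range(len(rgb[0]))] for padd in range(top_padding_len)] + rgb + [[(0, 0, 0, 0) for i in range(len(rgb[0]))] for padd in range(top_padding_len)]
--
--     for array in range(len(rgb)):
--         new_rgb.append([(0, 0, 0, 0) for i in range(side_padding_len)] + rgb[array] + [(0, 0, 0, 0) for i in range(side_padding_len)])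
--
--     return new_rgb
-- ===== SOURCE B (Python) =====
-- def clamp_rgb_size(rgb, pixelx, pixely):
--     # Coordinate-mapped generation: compute the output dimensions, then build each
--     # output pixel directly by index lookup with a bounds test (no concatenation).
--     w = len(rgb[0])
--     s = int((pixelx - w) / 2)
--     t = int((pixely - len(rgb)) / 2)
--     if s < 0:
--         s = 0
--     if t < 0:
--         t = 0
--     out = []
--     for j in range(len(rgb) + 2 * t):
--         if t <= j < t + len(rgb):
--             row = rgb[j - t]
--             out.append([row[i - s] if s <= i < s + len(row) else (0, 0, 0, 0)
--                         for i in range(len(row) + 2 * s)])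
--         else:
--             out.append([(0, 0, 0, 0) for i in range(w + 2 * s)])
--     return out
-- ===== Notes on version B (the rewrite author's own statement) =====
-- stated objective: alternative
-- what changed: Replaces A's two-stage concatenation (prepend/append transparent rows, then re-pad every row by concatenating pad lists) with coordinate-mapped generation: B computes the output dimensions and builds every output pixel directly by an index lookup with a bounds test, with no list concatenation at all.
import Mathlib
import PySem

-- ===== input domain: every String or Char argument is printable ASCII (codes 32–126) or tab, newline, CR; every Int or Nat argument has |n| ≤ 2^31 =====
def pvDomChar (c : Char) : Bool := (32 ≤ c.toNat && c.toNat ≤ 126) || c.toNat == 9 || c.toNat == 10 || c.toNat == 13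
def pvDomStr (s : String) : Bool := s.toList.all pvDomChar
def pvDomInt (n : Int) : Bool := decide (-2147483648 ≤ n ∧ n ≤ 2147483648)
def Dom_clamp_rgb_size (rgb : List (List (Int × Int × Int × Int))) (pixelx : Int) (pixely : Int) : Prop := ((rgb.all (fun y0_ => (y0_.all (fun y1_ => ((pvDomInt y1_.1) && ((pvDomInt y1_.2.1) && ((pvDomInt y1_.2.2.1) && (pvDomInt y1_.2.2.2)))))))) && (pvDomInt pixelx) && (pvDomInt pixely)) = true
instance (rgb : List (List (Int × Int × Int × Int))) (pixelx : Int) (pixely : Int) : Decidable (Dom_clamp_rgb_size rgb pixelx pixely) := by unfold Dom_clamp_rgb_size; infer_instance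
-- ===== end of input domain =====

-- B replaces A's two-stage concatenation (prepend/append transparent padding rows, then re-pad each
-- row by concatenating pad lists) with coordinate-mapped generation: it computes the output
-- dimensions and builds every output pixel directly by an index lookup with a bounds test.

-- ===== PORT A =====
-- 'int((a-b)/2)' : exact float halving of an int within Dom, truncated toward zero = Int.tdiv _ 2
def clamp_rgb_size (rgb : List (List (Int × Int × Int × Int))) (pixelx : Int) (pixely : Int) : List (List (Int × Int × Int × Int)) :=
  let row0 := rgb.headD []          -- rgb[0]; Pre_ excludes rgb = [] (IndexError)
  let side_padding_len : Int := Int.tdiv (pixelx - (row0.length : Int)) 2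
  let top_padding_len : Int := Int.tdiv (pixely - (rgb.length : Int)) 2
  let vpad := (PySem.List.pyRange 0 top_padding_len 1).map
      (fun _ => (PySem.List.pyRange 0 (row0.length : Int) 1).map (fun _ => ((0:Int),(0:Int),(0:Int),(0:Int))))
  let rgb2 := vpad ++ rgb ++ vpad
  (PySem.List.pyRange 0 (rgb2.length : Int) 1).foldl
    (fun acc i => acc ++
      [(PySem.List.pyRange 0 side_padding_len 1).map (fun _ => ((0:Int),(0:Int),(0:Int),(0:Int)))
        ++ PySem.List.pyGetD rgb2 i []
        ++ (PySem.List.pyRange 0 side_padding_len 1).map (fun _ => ((0:Int),(0:Int),(0:Int),(0:Int)))]) []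

-- ===== PORT B =====
def clamp_rgb_size_alt (rgb : List (List (Int × Int × Int × Int))) (pixelx : Int) (pixely : Int) : List (List (Int × Int × Int × Int)) :=
  let w : Int := (rgb.headD []).length
  let s0 : Int := Int.tdiv (pixelx - w) 2
  let s : Int := if s0 < 0 then 0 else s0
  let t0 : Int := Int.tdiv (pixely - (rgb.length : Int)) 2
  let t : Int := if t0 < 0 then 0 else t0
  (PySem.List.pyRange 0 ((rgb.length : Int) + 2 * t) 1).map (fun j =>
    if t ≤ j ∧ j < t + (rgb.length : Int) then
      let row := PySem.List.pyGetD rgb (j - t) []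
      (PySem.List.pyRange 0 ((row.length : Int) + 2 * s) 1).map (fun i =>
        if s ≤ i ∧ i < s + (row.length : Int) then PySem.List.pyGetD row (i - s) ((0:Int),(0:Int),(0:Int),(0:Int))
        else ((0:Int),(0:Int),(0:Int),(0:Int)))
    else
      (PySem.List.pyRange 0 (w + 2 * s) 1).map (fun _ => ((0:Int),(0:Int),(0:Int),(0:Int))))

-- ===== PRECONDITION & SPEC =====
-- Pre_ excludes only rgb = [], on which A raises IndexError at rgb[0].
def Pre_clamp_rgb_size (rgb : List (List (Int × Int × Int × Int))) (_pixelx : Int) (_pixely : Int) : Prop := rgb ≠ []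
instance (rgb : List (List (Int × Int × Int × Int))) (pixelx : Int) (pixely : Int) : Decidable (Pre_clamp_rgb_size rgb pixelx pixely) := by unfold Pre_clamp_rgb_size; infer_instance
def pvWitness_clamp_rgb_size : (List (List (Int × Int × Int × Int))) × Int × Int := ([[(1,2,3,4)]], 3, 3)
def Spec_clamp_rgb_size (rgb : List (List (Int × Int × Int × Int))) (pixelx : Int) (pixely : Int) (out : List (List (Int × Int × Int × Int))) : Prop := out = clamp_rgb_size_alt rgb pixelx pixely
instance (rgb : List (List (Int × Int × Int × Int))) (pixelx : Int) (pixely : Int) (out : List (List (Int × Int × Int × Int))) : Decidable (Spec_clamp_rgb_size rgb pixelx pixely out) := by unfold Spec_clamp_rgb_size; infer_instance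

-- ===== CLAIM (what is proved, stated in full; the proofs are below) =====
def Claim_equal_clamp_rgb_size : Prop := ∀ (rgb : List (List (Int × Int × Int × Int))) (pixelx : Int) (pixely : Int), Dom_clamp_rgb_size rgb pixelx pixely → Pre_clamp_rgb_size rgb pixelx pixely → Spec_clamp_rgb_size rgb pixelx pixely (clamp_rgb_size rgb pixelx pixely)

-- ===== LEMMAS AND PROOFS =====

-- a comprehension over range(n) producing a constant is replication
theorem pv_map_const_pyRange {α : Type} (n : Int) (c : α) :
    (PySem.List.pyRange 0 n 1).map (fun _ => c) = List.replicate n.toNat c := by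
  rw [PySem.List.pyRange_one, List.map_map]
  simp [Function.comp_def]

-- B's coordinate-generated padded row is pad ++ row ++ pad
theorem pv_row_eq {α : Type} (r : List α) (s : Int) (hs : 0 ≤ s) (d : α) :
    (PySem.List.pyRange 0 ((r.length : Int) + 2 * s) 1).map (fun i =>
        if s ≤ i ∧ i < s + (r.length : Int) then PySem.List.pyGetD r (i - s) d else d)
      = List.replicate s.toNat d ++ r ++ List.replicate s.toNat d := by
  rw [PySem.List.pyRange_one, List.map_map]
  apply List.ext_getElem
  · simp; omega
  · intro k h1 h2
    simp only [List.getElem_map, List.getElem_range, Function.comp_apply]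
    have hk : k < ((r.length : Int) + 2 * s - 0).toNat := by simpa using h1
    by_cases hc : s ≤ 0 + (k : Int) ∧ 0 + (k : Int) < s + (r.length : Int)
    · rw [if_pos hc]
      have hi0 : (0 : Int) ≤ 0 + (k : Int) - s := by omega
      have hi1 : 0 + (k : Int) - s < (r.length : Int) := by omega
      rw [PySem.List.pyGetD_eq_getElem r d hi0 hi1]
      have hL1 : k < (List.replicate s.toNat d ++ r).length := by simp; omega
      rw [List.getElem_append_left hL1]
      have hR1 : (List.replicate s.toNat d).length ≤ k := by simp; omega
      rw [List.getElem_append_right hR1]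
      simp only [List.length_replicate,
        show ((0 : Int) + (k : Int) - s).toNat = k - s.toNat from by omega]
    · rw [if_neg hc]
      by_cases hlo : k < s.toNat
      · have hL1 : k < (List.replicate s.toNat d ++ r).length := by simp; omega
        rw [List.getElem_append_left hL1]
        have hL2 : k < (List.replicate s.toNat d).length := by simpa using hlo
        rw [List.getElem_append_left hL2, List.getElem_replicate]
      · have hR1 : (List.replicate s.toNat d ++ r).length ≤ k := by simp; omega
        rw [List.getElem_append_right hR1, List.getElem_replicate]

-- mapping an index loop over range(len(xs)) with xs.getD is a map over xs
theorem pv_map_getD_range {α β : Type} (xs : List α) (d : α) (f : α → β) :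
    (List.range xs.length).map (fun k => f (xs.getD k d)) = xs.map f := by
  apply List.ext_getElem
  · simp
  · intro k h1 h2
    simp only [List.getElem_map, List.getElem_range]
    rw [List.getD_eq_getElem xs d (by simpa using h2)]

-- ===== VERDICT =====
theorem clamp_rgb_size_spec : Claim_equal_clamp_rgb_size := by
  unfold Claim_equal_clamp_rgb_size
  intro rgb pixelx pixely _hdom _hpre
  unfold Spec_clamp_rgb_size clamp_rgb_size clamp_rgb_size_alt
  simp only []
  set row0 := rgb.headD [] with hrow0
  set s0 : Int := Int.tdiv (pixelx - (row0.length : Int)) 2 with hs0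
  set t0 : Int := Int.tdiv (pixely - (rgb.length : Int)) 2 with ht0
  set s : Int := if s0 < 0 then 0 else s0 with hs
  set t : Int := if t0 < 0 then 0 else t0 with ht
  have hs_nonneg : 0 ≤ s := by rw [hs]; split_ifs <;> omega
  have ht_nonneg : 0 ≤ t := by rw [ht]; split_ifs <;> omega
  have hst : s.toNat = s0.toNat := by rw [hs]; split_ifs <;> omega
  have htt : t.toNat = t0.toNat := by rw [ht]; split_ifs <;> omega
  -- evaluate A's index loop to a map over the concatenated list
  rw [PySem.List.foldl_pyRange_zero_pyGetD' _ []
        (fun acc r => acc ++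
          [(PySem.List.pyRange 0 s0 1).map (fun _ => ((0:Int),(0:Int),(0:Int),(0:Int))) ++ r
            ++ (PySem.List.pyRange 0 s0 1).map (fun _ => ((0:Int),(0:Int),(0:Int),(0:Int)))]) []]
  rw [PySem.List.foldl_append_singleton_eq_map]
  -- split B's outer range into top border / interior / bottom border
  rw [PySem.List.pyRange_one_append 0 t ((rgb.length : Int) + 2 * t) ht_nonneg (by omega),
      PySem.List.pyRange_one_append t (t + (rgb.length : Int)) ((rgb.length : Int) + 2 * t) (by omega) (by omega),
      List.map_append, List.map_append]
  -- normalize the constant comprehensions to replications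
  simp only [pv_map_const_pyRange, List.map_append, List.map_replicate, List.nil_append,
    Int.toNat_natCast]
  -- a full-width blank row is pad ++ blank interior ++ pad
  have hCrow : List.replicate ((row0.length : Int) + 2 * s).toNat ((0:Int),(0:Int),(0:Int),(0:Int))
      = List.replicate s0.toNat ((0:Int),(0:Int),(0:Int),(0:Int))
          ++ List.replicate row0.length ((0:Int),(0:Int),(0:Int),(0:Int))
          ++ List.replicate s0.toNat ((0:Int),(0:Int),(0:Int),(0:Int)) := by
    rw [List.replicate_append_replicate, List.replicate_append_replicate]
    congr 1
    omega
  rw [← List.append_assoc]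
  congr 1
  · congr 1
    · -- top border rows
      rw [List.map_congr_left
            (g := fun _ => List.replicate ((row0.length : Int) + 2 * s).toNat
                ((0:Int),(0:Int),(0:Int),(0:Int)))
            (by intro j hj
                rw [PySem.List.mem_pyRange_one] at hj
                rw [if_neg (by omega)])]
      rw [List.map_const', hCrow, PySem.List.length_pyRange_one]
      congr 1
      omega
    · -- interior rows
      symm
      rw [List.map_congr_left
            (g := fun j =>
              (PySem.List.pyRange 0 (((PySem.List.pyGetD rgb (j - t) []).length : Int) + 2 * s) 1).map
                (fun i => if s ≤ i ∧ i < s + ((PySem.List.pyGetD rgb (j - t) []).length : Int)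
                  then PySem.List.pyGetD (PySem.List.pyGetD rgb (j - t) []) (i - s) ((0:Int),(0:Int),(0:Int),(0:Int))
                  else ((0:Int),(0:Int),(0:Int),(0:Int))))
            (by intro j hj
                rw [PySem.List.mem_pyRange_one] at hj
                rw [if_pos (by omega)])]
      rw [PySem.List.pyRange_one, List.map_map]
      rw [show ((t + (rgb.length : Int)) - t).toNat = rgb.length from by omega]
      rw [List.map_congr_left
            (g := fun k => List.replicate s.toNat ((0:Int),(0:Int),(0:Int),(0:Int))
                ++ rgb.getD k [] ++ List.replicate s.toNat ((0:Int),(0:Int),(0:Int),(0:Int)))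
            (by intro k hk
                simp only [Function.comp_apply,
                  show ∀ kk : Int, t + kk - t = kk from by intro kk; omega,
                  PySem.List.pyGetD_natCast]
                exact pv_row_eq (rgb.getD k []) s hs_nonneg _)]
      rw [pv_map_getD_range rgb []
            (fun r => List.replicate s.toNat ((0:Int),(0:Int),(0:Int),(0:Int))
              ++ r ++ List.replicate s.toNat ((0:Int),(0:Int),(0:Int),(0:Int)))]
      simp only [hst]
  · -- bottom border rows
    rw [List.map_congr_left
          (g := fun _ => List.replicate ((row0.length : Int) + 2 * s).toNat
              ((0:Int),(0:Int),(0:Int),(0:Int)))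
          (by intro j hj
              rw [PySem.List.mem_pyRange_one] at hj
              rw [if_neg (by omega)])]
    rw [List.map_const', hCrow, PySem.List.length_pyRange_one]
    congr 1
    omega
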